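-- pv_equiv track=rewrite | github.com/francosofia/final_progra_1 | pruebas.py | encontrar_secuencias_consecutivas
-- ===== SOURCE A (Python) =====
-- def encontrar_secuencias_consecutivas(lista):
--     """
--     Encuentra todas las secuencias consecutivas en una lista de números.
--
--     :param lista: Lista de números.
--     :return: Lista de secuencias consecutivas.
--     """
--     secuencias = []
--     secuencia_actual = [lista[0]]
--
--     for i in range(1, len(lista)):
--         if lista[i] == lista[i - 1] + 1:
--             secuencia_actual.append(lista[i])
--         else:
--             if len(secuencia_actual) > 1:
--                 secuencias.append(secuencia_actual)
--             secuencia_actual = [lista[i]]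
--
--     # Añadir la última secuencia si es válida
--     if len(secuencia_actual) > 1:
--         secuencias.append(secuencia_actual)
--
--     return secuencias
-- ===== SOURCE B (Python) =====
-- def encontrar_secuencias_consecutivas(lista):
--     """Two-pass: compute the break positions, then slice out the runs."""
--     n = len(lista)
--     cortes = [0] + [i for i in range(1, n) if lista[i] != lista[i - 1] + 1] + [n]
--     return [lista[a:b] for a, b in zip(cortes, cortes[1:]) if b - a > 1]
-- ===== Notes on version B (the rewrite author's own statement) =====
-- stated objective: alternative
-- what changed: B replaces A's single accumulator loop (growing a current run and flushing it at each break) by a two-pass formulation: first compute the list of break positions, then slice the input between consecutive breaks and keep slices longer than 1.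
import Mathlib
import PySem

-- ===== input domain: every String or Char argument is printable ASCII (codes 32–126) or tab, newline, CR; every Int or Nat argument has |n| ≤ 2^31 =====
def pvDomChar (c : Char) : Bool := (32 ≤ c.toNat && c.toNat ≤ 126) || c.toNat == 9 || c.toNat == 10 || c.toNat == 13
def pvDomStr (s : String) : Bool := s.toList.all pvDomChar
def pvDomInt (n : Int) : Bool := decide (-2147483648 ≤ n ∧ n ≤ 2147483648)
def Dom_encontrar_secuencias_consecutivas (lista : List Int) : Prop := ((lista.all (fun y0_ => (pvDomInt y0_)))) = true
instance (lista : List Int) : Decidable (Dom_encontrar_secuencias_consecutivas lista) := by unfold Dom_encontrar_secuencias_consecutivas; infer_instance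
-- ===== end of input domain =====

-- B computes the same runs by a two-pass break-position/slice formulation instead of A's
-- accumulator loop (objective: alternative, same linear cost); on [] A raises IndexError, B returns [].

-- ===== PORT A =====
-- the loop body of A (branches in A's order)
def stepA (lista : List Int) (st : List (List Int) × List Int) (i : Int) : List (List Int) × List Int :=
  if PySem.List.pyGetD lista i 0 == PySem.List.pyGetD lista (i - 1) 0 + 1 then
    (st.1, st.2 ++ [PySem.List.pyGetD lista i 0])
  else
    ((if st.2.length > 1 then st.1 ++ [st.2] else st.1), [PySem.List.pyGetD lista i 0])

def encontrar_secuencias_consecutivas (lista : List Int) : List (List Int) :=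
  match lista with
  | [] => []   -- Python raises IndexError at lista[0]; excluded by Pre_
  | x :: _ =>
    let st := (PySem.List.pyRange 1 (PySem.List.len lista) 1).foldl (stepA lista) ([], [x])
    if st.2.length > 1 then st.1 ++ [st.2] else st.1

-- ===== PORT B =====
-- the break test of Source B's comprehension: lista[i] != lista[i-1] + 1
def brk (lista : List Int) (i : Int) : Bool :=
  !(PySem.List.pyGetD lista i 0 == PySem.List.pyGetD lista (i - 1) 0 + 1)

def encontrar_secuencias_consecutivas_alt (lista : List Int) : List (List Int) :=
  let n : Int := PySem.List.len lista
  let cortes : List Int := [0] ++ (PySem.List.pyRange 1 n 1).filter (brk lista) ++ [n]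
  ((cortes.zip cortes.tail).filter (fun p => p.2 - p.1 > 1)).map
    (fun p => PySem.List.slice lista (some p.1) (some p.2))

-- ===== PRECONDITION & SPEC =====
-- Pre_ excludes only the empty list, on which Python A raises IndexError (lista[0]).
def Pre_encontrar_secuencias_consecutivas (lista : List Int) : Prop := lista ≠ []
instance (lista : List Int) : Decidable (Pre_encontrar_secuencias_consecutivas lista) := by unfold Pre_encontrar_secuencias_consecutivas; infer_instance
def pvWitness_encontrar_secuencias_consecutivas : List Int := [1, 2, 5]

def Spec_encontrar_secuencias_consecutivas (lista : List Int) (out : List (List Int)) : Prop := out = encontrar_secuencias_consecutivas_alt lista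
instance (lista : List Int) (out : List (List Int)) : Decidable (Spec_encontrar_secuencias_consecutivas lista out) := by unfold Spec_encontrar_secuencias_consecutivas; infer_instance

-- ===== CLAIM (what is proved, stated in full; the proofs are below) =====
def Claim_equal_encontrar_secuencias_consecutivas : Prop := ∀ (lista : List Int), Dom_encontrar_secuencias_consecutivas lista → Pre_encontrar_secuencias_consecutivas lista → Spec_encontrar_secuencias_consecutivas lista (encontrar_secuencias_consecutivas lista)

-- ===== LEMMAS AND PROOFS =====

-- the runs B extracts from a list of cut positions
def runsOf (lista : List Int) (c : List Int) : List (List Int) :=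
  ((c.zip c.tail).filter (fun p => p.2 - p.1 > 1)).map
    (fun p => PySem.List.slice lista (some p.1) (some p.2))

-- the cut positions strictly below k, including 0
def cuts (lista : List Int) (k : Nat) : List Int :=
  0 :: (PySem.List.pyRange 1 (k : Int) 1).filter (brk lista)

-- the start of the run that is still open after processing indices < k
def lastCut (lista : List Int) (k : Nat) : Int :=
  ((cuts lista k).getLast?).getD 0

theorem cuts_ne_nil (lista : List Int) (k : Nat) : cuts lista k ≠ [] := by
  simp [cuts]

theorem getLast?_cuts (lista : List Int) (k : Nat) :
    (cuts lista k).getLast? = some (lastCut lista k) := by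
  rw [List.getLast?_eq_some_getLast (cuts_ne_nil lista k)]
  rw [lastCut, List.getLast?_eq_some_getLast (cuts_ne_nil lista k)]
  rfl

theorem mem_cuts (lista : List Int) (k : Nat) (hk : 1 ≤ k) {i : Int} (h : i ∈ cuts lista k) :
    0 ≤ i ∧ i < (k : Int) := by
  rcases List.mem_cons.1 h with h | h
  · subst h; constructor <;> omega
  · have h1 := (List.mem_filter.1 h).1
    have h2 := PySem.List.mem_pyRange_one.1 h1
    omega

theorem lastCut_bounds (lista : List Int) (k : Nat) (hk : 1 ≤ k) :
    0 ≤ lastCut lista k ∧ lastCut lista k < (k : Int) := by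
  apply mem_cuts lista k hk
  have h := getLast?_cuts lista k
  exact List.mem_of_getLast? h

theorem slice_len (xs : List Int) (a b : Int) (h0 : 0 ≤ a) (hab : a ≤ b)
    (hb : b ≤ (xs.length : Int)) :
    ((PySem.List.slice xs (some a) (some b)).length : Int) = b - a := by
  rw [PySem.List.slice_toNat _ h0 (by omega)]
  simp only [List.length_take, List.length_drop]
  omega

theorem slice_snoc (xs : List Int) (a : Int) (k : Nat) (h0 : 0 ≤ a) (hak : a ≤ (k : Int))
    (hk : k < xs.length) :
    PySem.List.slice xs (some a) (some ((k : Int) + 1)) =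
      PySem.List.slice xs (some a) (some (k : Int)) ++ [xs.getD k 0] := by
  rw [PySem.List.slice_toNat _ h0 (by omega), PySem.List.slice_toNat _ h0 (by omega)]
  have h1 : ((k : Int) + 1).toNat - a.toNat = ((k : Int).toNat - a.toNat) + 1 := by omega
  rw [h1, List.take_add_one]
  have h2 : (xs.drop a.toNat)[(k : Int).toNat - a.toNat]? = some (xs.getD k 0) := by
    rw [List.getElem?_drop]
    have h3 : a.toNat + ((k : Int).toNat - a.toNat) = k := by omega
    rw [h3, List.getElem?_eq_getElem hk, List.getD_eq_getElem _ _ hk]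
  rw [h2]
  rfl

theorem slice_singleton (xs : List Int) (k : Nat) (hk : k < xs.length) :
    PySem.List.slice xs (some (k : Int)) (some ((k : Int) + 1)) = [xs.getD k 0] := by
  rw [PySem.List.slice_toNat _ (by omega) (by omega)]
  have h1 : ((k : Int) + 1).toNat - (k : Int).toNat = 1 := by omega
  rw [h1, List.take_one]
  simp [List.getD, List.getElem?_eq_getElem hk]

theorem zip_tail_snoc (c : List Int) (y L : Int) (hL : c.getLast? = some L) :
    (c ++ [y]).zip (c.tail ++ [y]) = c.zip c.tail ++ [(L, y)] := by
  induction c with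
  | nil => simp at hL
  | cons a t ih =>
    cases t with
    | nil =>
      simp at hL
      subst hL
      simp
    | cons b t' =>
      have h := ih (by simpa using hL)
      simp only [List.cons_append, List.zip_cons_cons, List.tail_cons] at h ⊢
      rw [h]

theorem runsOf_snoc (lista c : List Int) (y L : Int) (hL : c.getLast? = some L) :
    runsOf lista (c ++ [y]) =
      runsOf lista c ++
        (if y - L > 1 then [PySem.List.slice lista (some L) (some y)] else []) := by
  have hc : c ≠ [] := by intro h; subst h; simp at hL
  unfold runsOf
  have ht : (c ++ [y]).tail = c.tail ++ [y] := by
    cases c with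
    | nil => exact absurd rfl hc
    | cons a t => simp
  rw [ht, zip_tail_snoc c y L hL, List.filter_append, List.map_append]
  congr 1
  by_cases h : y - L > 1 <;> simp [h]

-- loop invariant for A's fold: state = (runs completed so far, current run as a slice)
theorem invA (lista : List Int) (hne : lista ≠ []) :
    ∀ k : Nat, 1 ≤ k → k ≤ lista.length →
      (PySem.List.pyRange 1 (k : Int) 1).foldl (stepA lista) ([], [lista.getD 0 0]) =
        (runsOf lista (cuts lista k),
         PySem.List.slice lista (some (lastCut lista k)) (some (k : Int))) := by
  intro k hk
  induction k, hk using Nat.le_induction with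
  | base =>
    intro _
    have hr : PySem.List.pyRange 1 ((1 : Nat) : Int) 1 = [] :=
      PySem.List.pyRange_one_eq_nil (by omega)
    have hc : cuts lista 1 = [0] := by
      unfold cuts
      rw [hr]
      rfl
    have h0 : 0 < lista.length := List.length_pos_iff.2 hne
    have hs : PySem.List.slice lista (some (lastCut lista 1)) (some ((1 : Nat) : Int)) =
        [lista.getD 0 0] := by
      have hl : lastCut lista 1 = 0 := by rw [lastCut, hc]; rfl
      rw [hl]
      have := slice_singleton lista 0 h0
      simpa using this
    rw [hr]
    simp only [List.foldl_nil, hs, hc]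
    simp [runsOf]
  | succ k hk1 ih =>
    intro hlen
    have hlen' : k ≤ lista.length := by omega
    have hklt : k < lista.length := by omega
    have hcast : ((k + 1 : Nat) : Int) = (k : Int) + 1 := by push_cast; ring
    have hsplit : PySem.List.pyRange 1 ((k + 1 : Nat) : Int) 1 =
        PySem.List.pyRange 1 (k : Int) 1 ++ [(k : Int)] := by
      rw [hcast]
      exact PySem.List.pyRange_one_succ_right (by omega)
    have hget : PySem.List.pyGetD lista ((k : Int)) 0 = lista.getD k 0 := by
      simp [PySem.List.pyGetD_natCast]
    obtain ⟨hL0, hLk⟩ := lastCut_bounds lista k hk1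
    rw [hsplit, List.foldl_append, ih hlen']
    by_cases hb : brk lista (k : Int)
    · -- break at k: flush the current run (if long enough), start a new run [lista[k]]
      have htest : (PySem.List.pyGetD lista ((k : Int)) 0 ==
          PySem.List.pyGetD lista ((k : Int) - 1) 0 + 1) = false := by
        unfold brk at hb
        simpa using hb
      have hcuts : cuts lista (k + 1) = cuts lista k ++ [(k : Int)] := by
        unfold cuts
        rw [hcast, PySem.List.pyRange_one_succ_right (by omega), List.filter_append]
        simp [hb]
      have hlast : lastCut lista (k + 1) = (k : Int) := by
        rw [lastCut, hcuts]
        simp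
      have hruns : runsOf lista (cuts lista (k + 1)) =
          runsOf lista (cuts lista k) ++
            (if (k : Int) - lastCut lista k > 1 then
              [PySem.List.slice lista (some (lastCut lista k)) (some (k : Int))] else []) := by
        rw [hcuts]
        exact runsOf_snoc lista _ _ _ (getLast?_cuts lista k)
      have hcond : ((k : Int) - lastCut lista k > 1) ↔
          1 < (PySem.List.slice lista (some (lastCut lista k)) (some (k : Int))).length := by
        have := slice_len lista (lastCut lista k) (k : Int) hL0 (by omega) (by omega)
        omega
      have hnew : PySem.List.slice lista (some (lastCut lista (k + 1)))
          (some ((k + 1 : Nat) : Int)) = [PySem.List.pyGetD lista ((k : Int)) 0] := by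
        rw [hlast, hcast, hget]
        exact slice_singleton lista k hklt
      rw [hruns, hnew]
      simp only [List.foldl_cons, List.foldl_nil, stepA, htest, Bool.false_eq_true, if_false]
      by_cases hc2 : (k : Int) - lastCut lista k > 1
      · rw [if_pos hc2, if_pos (hcond.mp hc2)]
      · rw [if_neg hc2, if_neg (fun h => hc2 (hcond.mpr h))]
        simp
    · -- lista[k] continues the run: append it to the current slice
      have htest : (PySem.List.pyGetD lista ((k : Int)) 0 ==
          PySem.List.pyGetD lista ((k : Int) - 1) 0 + 1) = true := by
        unfold brk at hb
        simpa using hb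
      have hcuts : cuts lista (k + 1) = cuts lista k := by
        unfold cuts
        rw [hcast, PySem.List.pyRange_one_succ_right (by omega), List.filter_append]
        simp [hb]
      have hlast : lastCut lista (k + 1) = lastCut lista k := by
        rw [lastCut, hcuts]
        rfl
      have hcur : PySem.List.slice lista (some (lastCut lista (k + 1)))
          (some ((k + 1 : Nat) : Int)) =
          PySem.List.slice lista (some (lastCut lista k)) (some (k : Int)) ++
            [PySem.List.pyGetD lista ((k : Int)) 0] := by
        rw [hlast, hcast, hget]
        exact slice_snoc lista (lastCut lista k) k hL0 (by omega) hklt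
      rw [hcuts, hcur]
      simp only [List.foldl_cons, List.foldl_nil, stepA, htest, if_true]

-- ===== VERDICT (by name: the statement is the Claim_ definition above) =====
theorem encontrar_secuencias_consecutivas_spec : Claim_equal_encontrar_secuencias_consecutivas := by
  intro lista _ hpre
  unfold Spec_encontrar_secuencias_consecutivas
  match lista, hpre with
  | x :: rest, _ =>
    set l := x :: rest with hl
    have hne : l ≠ [] := by simp [hl]
    have hk1 : 1 ≤ l.length := by simp [hl]
    have hlen : PySem.List.len l = ((l.length : Nat) : Int) := by
      simp [PySem.List.len_eq]
    have hinv := invA l hne l.length hk1 le_rfl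
    obtain ⟨hL0, hLk⟩ := lastCut_bounds l l.length hk1
    have hA : encontrar_secuencias_consecutivas l =
        (if 1 < (PySem.List.slice l (some (lastCut l l.length))
              (some ((l.length : Nat) : Int))).length then
          runsOf l (cuts l l.length) ++
            [PySem.List.slice l (some (lastCut l l.length)) (some ((l.length : Nat) : Int))]
        else runsOf l (cuts l l.length)) := by
      show (let st := (PySem.List.pyRange 1 (PySem.List.len l) 1).foldl (stepA l) ([], [x]);
            if st.2.length > 1 then st.1 ++ [st.2] else st.1) = _
      rw [hlen]
      have hx : ([] , [x]) = (([] : List (List Int)), [l.getD 0 0]) := by simp [hl]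
      rw [hx, hinv]
    have hB : encontrar_secuencias_consecutivas_alt l =
        runsOf l (cuts l l.length ++ [((l.length : Nat) : Int)]) := by
      show ((((([0] ++ (PySem.List.pyRange 1 (PySem.List.len l) 1).filter (brk l) ++
            [PySem.List.len l])).zip
            (([0] ++ (PySem.List.pyRange 1 (PySem.List.len l) 1).filter (brk l) ++
            [PySem.List.len l])).tail).filter (fun p : ℤ × ℤ => p.2 - p.1 > 1)).map
            (fun p : ℤ × ℤ => PySem.List.slice l (some p.1) (some p.2))) = _
      rw [hlen]
      rfl
    rw [hA, hB, runsOf_snoc l _ _ _ (getLast?_cuts l l.length)]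
    have hcond : ((l.length : Int) - lastCut l l.length > 1) ↔
        1 < (PySem.List.slice l (some (lastCut l l.length))
            (some ((l.length : Nat) : Int))).length := by
      have := slice_len l (lastCut l l.length) ((l.length : Nat) : Int) hL0 (by omega) (by omega)
      omega
    by_cases hc2 : ((l.length : Int) - lastCut l l.length > 1)
    · rw [if_pos (hcond.mp hc2), if_pos hc2]
    · rw [if_neg (fun h => hc2 (hcond.mpr h)), if_neg hc2]
      simp
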